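-- pv_equiv track=rewrite | github.com/lingpy/sinopy | sinopy.py | clean_chinese_ipa
-- ===== SOURCE A (Python) =====
-- def clean_chinese_ipa(seq):
--
--     tones = list(zip('0123456','¹²³⁴⁵⁶'))
--
--     st = [('tsh', "ʦʰ"),
--           ('ts', 'ʦ'),
--           ("th","tʰ"),
--           ("kh","kʰ"),
--           ("ph","pʰ"),
--           ("pfh","p͡fʰ"),
--           ("pf","p͡f"),
--           ('dz', "ʣ")
--           ]
--     st = sorted(st, key=lambda x: len(x[0]), reverse=True)
--
--     for s,t in tones:
--         seq = seq.replace(s,t)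
--     for s,t in st:
--         seq = seq.replace(s,t)
--
--     if ' ' in seq:
--         seq = seq.replace(' ','')
--
--     return seq
-- ===== SOURCE B (Python) =====
-- def clean_chinese_ipa(seq):
--     # single left-to-right longest-match-first pass over one rule table
--     rules = [('tsh', "\u02a6\u02b0"), ('pfh', "p\u0361f\u02b0"),
--              ('ts', "\u02a6"), ('th', "t\u02b0"), ('kh', "k\u02b0"),
--              ('ph', "p\u02b0"), ('pf', "p\u0361f"), ('dz', "\u02a3"),
--              (' ', '')]
--     rules += list(zip('0123456', '\u00b9\u00b2\u00b3\u2074\u2075\u2076'))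
--     out = []
--     i = 0
--     n = len(seq)
--     while i < n:
--         for pat, rep in rules:
--             if seq.startswith(pat, i):
--                 out.append(rep)
--                 i += len(pat)
--                 break
--         else:
--             out.append(seq[i])
--             i += 1
--     return ''.join(out)
-- ===== Notes on version B (the rewrite author's own statement) =====
-- stated objective: alternative
-- what changed: Replaces A's ~15 sequential whole-string .replace passes (tone digits, sorted consonant digraphs, space removal) with a single left-to-right longest-match-first scan over one precomputed rule table built from exactly the same data, reproducing A's tie order and its truncated digit-to-superscript zip.
import Mathlib
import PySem

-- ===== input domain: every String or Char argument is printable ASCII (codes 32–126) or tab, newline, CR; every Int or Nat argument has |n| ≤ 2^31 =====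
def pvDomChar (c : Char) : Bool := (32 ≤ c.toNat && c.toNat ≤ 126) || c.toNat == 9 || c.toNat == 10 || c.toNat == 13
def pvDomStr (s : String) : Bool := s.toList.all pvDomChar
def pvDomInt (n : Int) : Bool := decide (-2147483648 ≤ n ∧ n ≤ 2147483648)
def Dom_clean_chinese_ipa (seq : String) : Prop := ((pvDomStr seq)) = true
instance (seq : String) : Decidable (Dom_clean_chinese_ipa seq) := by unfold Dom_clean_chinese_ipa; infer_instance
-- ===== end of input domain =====

-- B replaces A's ~15 sequential whole-string .replace passes by a single left-to-right
-- longest-match-first scan over one precomputed rule table (objective: alternative, same cost).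

-- ===== PORT A =====
def clean_chinese_ipa (seq : String) : String :=
  let tones : List (Char × Char) := List.zip "0123456".toList "¹²³⁴⁵⁶".toList
  let st : List (String × String) :=
    [("tsh", "ʦʰ"), ("ts", "ʦ"), ("th", "tʰ"), ("kh", "kʰ"),
     ("ph", "pʰ"), ("pfh", "p͡fʰ"), ("pf", "p͡f"), ("dz", "ʣ")]
  let st := PySem.List.sorted st (fun x => PySem.Str.len x.1) true
  let seq := tones.foldl (fun s p => PySem.Str.replace s (String.ofList [p.1]) (String.ofList [p.2])) seq
  let seq := st.foldl (fun s p => PySem.Str.replace s p.1 p.2) seq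
  if PySem.Str.isIn " " seq then PySem.Str.replace seq " " "" else seq

-- ===== PORT B =====
-- the rule table of Source B: longest patterns first, then the 2-char pairs, space, tone digits
def pvRules : List (List Char × List Char) :=
  [("tsh".toList, "ʦʰ".toList), ("pfh".toList, "p͡fʰ".toList),
   ("ts".toList, "ʦ".toList), ("th".toList, "tʰ".toList), ("kh".toList, "kʰ".toList),
   ("ph".toList, "pʰ".toList), ("pf".toList, "p͡f".toList), ("dz".toList, "ʣ".toList),
   (" ".toList, "".toList)]
  ++ (List.zip "0123456".toList "¹²³⁴⁵⁶".toList).map (fun p => ([p.1], [p.2]))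

-- inner `for pat, rep in rules: if seq.startswith(pat, i): break` loop of Source B
def pvFindRule : List (List Char × List Char) → List Char → Option (List Char × List Char)
  | [], _ => none
  | (p, r) :: rs, l => if p.isPrefixOf l then some (p, r) else pvFindRule rs l

-- the while loop of Source B, on the remaining suffix of the input
def pvScan : List Char → List Char
  | [] => []
  | c :: t =>
    match pvFindRule pvRules (c :: t) with
    | some (p, r) => r ++ pvScan (t.drop (p.length - 1))   -- i += len(pat)
    | none => c :: pvScan t                                 -- copy one char
termination_by l => l.length
decreasing_by all_goals simp <;> omega

def clean_chinese_ipa_alt (seq : String) : String := String.ofList (pvScan seq.toList)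

-- ===== PRECONDITION & SPEC =====
def Spec_clean_chinese_ipa (seq : String) (out : String) : Prop := out = clean_chinese_ipa_alt seq
instance (seq : String) (out : String) : Decidable (Spec_clean_chinese_ipa seq out) := by unfold Spec_clean_chinese_ipa; infer_instance

-- ===== CLAIM (what is proved, stated in full; the proofs are below) =====
def Claim_equal_clean_chinese_ipa : Prop := ∀ (seq : String), Dom_clean_chinese_ipa seq → Spec_clean_chinese_ipa seq (clean_chinese_ipa seq)

-- ===== LEMMAS AND PROOFS =====

-- fuel-free rendering of Python's str.replace for a nonempty pattern
def pvRepl (old new : List Char) : List Char → List Char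
  | [] => []
  | c :: t =>
    if old.isPrefixOf (c :: t) ∧ old ≠ [] then new ++ pvRepl old new (t.drop (old.length - 1))
    else c :: pvRepl old new t
termination_by l => l.length
decreasing_by all_goals simp <;> omega

theorem pvRepl_nil (old new : List Char) : pvRepl old new [] = [] := by rw [pvRepl]

theorem pvRepl_pos (old new : List Char) (c : Char) (t : List Char)
    (h : old.isPrefixOf (c :: t) = true) (h0 : ¬ old = []) :
    pvRepl old new (c :: t) = new ++ pvRepl old new (t.drop (old.length - 1)) := by
  rw [pvRepl, if_pos ⟨h, h0⟩]

theorem pvRepl_neg (old new : List Char) (c : Char) (t : List Char)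
    (h : old.isPrefixOf (c :: t) = false) :
    pvRepl old new (c :: t) = c :: pvRepl old new t := by
  rw [pvRepl, if_neg (by simp [h])]

theorem pvGo_eq (old new : List Char) (h : old ≠ []) :
    ∀ fuel (l acc : List Char), l.length ≤ fuel →
      PySem.Chars.replace.go old new fuel l acc = acc.reverse ++ pvRepl old new l := by
  intro fuel
  induction fuel with
  | zero => intro l acc hl; rcases l with _ | ⟨c, t⟩ <;> simp_all [PySem.Chars.replace.go, pvRepl]
  | succ n ih =>
    intro l acc hl
    rcases l with _ | ⟨c, t⟩
    · simp [PySem.Chars.replace.go, pvRepl]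
    · rw [PySem.Chars.replace.go]
      by_cases hp : old.isPrefixOf (c :: t)
      · rw [if_pos hp]
        rcases old with _ | ⟨o, os⟩; · exact absurd rfl h
        have hd : (c :: t).drop (o :: os).length = t.drop ((o :: os).length - 1) := by simp
        rw [hd, ih _ _ (by simp at hl ⊢; omega)]
        rw [pvRepl, if_pos ⟨hp, h⟩]
        simp
      · rw [if_neg hp, ih _ _ (by simp at hl ⊢; omega)]
        rw [pvRepl, if_neg (by tauto)]
        simp

theorem pvReplace_eq (old new l : List Char) (h : ¬ old = []) :
    PySem.Chars.replace l old new = pvRepl old new l := by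
  rw [PySem.Chars.replace, if_neg (by simp [h])]
  simpa using pvGo_eq old new h l.length l [] le_rfl

-- the tone stage is a character map
def pvToneChar (c : Char) : Char :=
  if c = '0' then '¹' else if c = '1' then '²' else if c = '2' then '³'
  else if c = '3' then '⁴' else if c = '4' then '⁵' else if c = '5' then '⁶' else c

def pvT (l : List Char) : List Char := l.map pvToneChar

-- the eight consonant passes in the order A's stable reverse sort applies them
def pvSt (l : List Char) : List Char :=
  pvRepl "dz".toList "ʣ".toList <| pvRepl "pf".toList "p͡f".toList <|
  pvRepl "ph".toList "pʰ".toList <| pvRepl "kh".toList "kʰ".toList <|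
  pvRepl "th".toList "tʰ".toList <| pvRepl "ts".toList "ʦ".toList <|
  pvRepl "pfh".toList "p͡fʰ".toList <| pvRepl "tsh".toList "ʦʰ".toList l

-- A's whole pipeline as one normal form
def pvN (l : List Char) : List Char := pvRepl [' '] [] (pvSt (pvT l))

-- step lemmas for grinding a pass over a known front
theorem pvRepl_fire1 (a : Char) (R t : List Char) :
    pvRepl [a] R (a :: t) = R ++ pvRepl [a] R t := by
  rw [pvRepl_pos _ _ _ _ (by simp [List.isPrefixOf]) (by simp)]; simp

theorem pvRepl_fire2 (a b : Char) (R t : List Char) :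
    pvRepl [a, b] R (a :: b :: t) = R ++ pvRepl [a, b] R t := by
  rw [pvRepl_pos _ _ _ _ (by simp [List.isPrefixOf]) (by simp)]; simp

theorem pvRepl_fire3 (a b c : Char) (R t : List Char) :
    pvRepl [a, b, c] R (a :: b :: c :: t) = R ++ pvRepl [a, b, c] R t := by
  rw [pvRepl_pos _ _ _ _ (by simp [List.isPrefixOf]) (by simp)]; simp

theorem pvRepl_skip1 (a : Char) (P' R : List Char) (d : Char) (t : List Char) (h : ¬ a = d) :
    pvRepl (a :: P') R (d :: t) = d :: pvRepl (a :: P') R t := by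
  rw [pvRepl_neg _ _ _ _ (by simp [List.isPrefixOf, h])]

theorem pvRepl_skip2 (a b : Char) (P' R : List Char) (e : Char) (t : List Char) (h : ¬ b = e) :
    pvRepl (a :: b :: P') R (a :: e :: t) = a :: pvRepl (a :: b :: P') R (e :: t) := by
  rw [pvRepl_neg _ _ _ _ (by simp [List.isPrefixOf, h])]

theorem pvRepl_skipb (a b : Char) (P' R : List Char) (t : List Char) (h : t.head? ≠ some b) :
    pvRepl (a :: b :: P') R (a :: t) = a :: pvRepl (a :: b :: P') R t := by
  rcases t with _ | ⟨x, t⟩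
  · rw [pvRepl_neg _ _ _ _ (by simp [List.isPrefixOf])]
  · exact pvRepl_skip2 a b P' R x t (by simp_all [ne_comm])

theorem pvRepl_skipc (a b c0 : Char) (R t : List Char) (hab : ¬ a = b)
    (h : t.head? ≠ some c0) :
    pvRepl [a, b, c0] R (a :: b :: t) = a :: b :: pvRepl [a, b, c0] R t := by
  have h1 : ([a, b, c0].isPrefixOf (a :: b :: t)) = false := by
    rcases t with _ | ⟨x, t⟩ <;> simp_all [List.isPrefixOf, ne_comm]
  rw [pvRepl_neg _ _ _ _ h1, pvRepl_skip1 _ _ _ _ _ hab]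

-- head tracking through a pass with a nonempty replacement
theorem pvRepl_head_ne (old new l : List Char) (b : Char) (hnew : new.head? ≠ some b)
    (hnil : new ≠ []) (h : l.head? ≠ some b) : (pvRepl old new l).head? ≠ some b := by
  rcases l with _ | ⟨c, t⟩
  · simp [pvRepl_nil]
  · rw [pvRepl]
    split_ifs
    · rcases new with _ | ⟨x, m⟩
      · exact absurd rfl hnil
      · simpa using hnew
    · simpa using h

theorem pvT_head (b : Char) (u : List Char) (hb : b ∉ ['¹', '²', '³', '⁴', '⁵', '⁶'])
    (h : u.head? ≠ some b) : (List.map pvToneChar u).head? ≠ some b := by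
  rcases u with _ | ⟨c, t⟩
  · simp
  · simp_all [pvToneChar]
    split_ifs <;> simp_all [ne_comm]

theorem singleton_isPrefixOf_iff (b : Char) (u : List Char) :
    [b].isPrefixOf u = true ↔ u.head? = some b := by
  rcases u with _ | ⟨c, t⟩
  · simp [List.isPrefixOf]
  · simp only [List.isPrefixOf, List.head?]
    constructor
    · intro h; simp at h; simp [h]
    · intro h; simp at h; simp [h]

theorem pair_isPrefixOf_iff (a b c : Char) (t : List Char) :
    [a, b].isPrefixOf (c :: t) = true ↔ a = c ∧ t.head? = some b := by
  simp only [List.isPrefixOf]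
  rw [Bool.and_eq_true, beq_iff_eq]
  exact and_congr Iff.rfl (singleton_isPrefixOf_iff b t)

-- pvN over each possible front of the input
theorem pvN_tsh (u : List Char) : pvN ('t' :: 's' :: 'h' :: u) = 'ʦ' :: 'ʰ' :: pvN u := by
  simp [pvN, pvSt, pvT, pvToneChar, pvRepl_fire1, pvRepl_fire2, pvRepl_fire3,
        pvRepl_skip1, pvRepl_skip2]

theorem pvN_pfh (u : List Char) : pvN ('p' :: 'f' :: 'h' :: u) = 'p' :: '͡' :: 'f' :: 'ʰ' :: pvN u := by
  simp [pvN, pvSt, pvT, pvToneChar, pvRepl_fire1, pvRepl_fire2, pvRepl_fire3,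
        pvRepl_skip1, pvRepl_skip2]

theorem pvN_ts (u : List Char) (h : u.head? ≠ some 'h') :
    pvN ('t' :: 's' :: u) = 'ʦ' :: pvN u := by
  have hX : (List.map pvToneChar u).head? ≠ some 'h' := pvT_head 'h' u (by decide) h
  simp [pvN, pvSt, pvT, pvToneChar, pvRepl_fire1, pvRepl_fire2, pvRepl_fire3,
        pvRepl_skip1, pvRepl_skip2, pvRepl_skipc 't' 's' 'h' _ _ (by decide) hX]

theorem pvN_th (u : List Char) : pvN ('t' :: 'h' :: u) = 't' :: 'ʰ' :: pvN u := by
  simp [pvN, pvSt, pvT, pvToneChar, pvRepl_fire1, pvRepl_fire2, pvRepl_fire3,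
        pvRepl_skip1, pvRepl_skip2]

theorem pvN_kh (u : List Char) : pvN ('k' :: 'h' :: u) = 'k' :: 'ʰ' :: pvN u := by
  simp [pvN, pvSt, pvT, pvToneChar, pvRepl_fire1, pvRepl_fire2, pvRepl_fire3,
        pvRepl_skip1, pvRepl_skip2]

theorem pvN_ph (u : List Char) : pvN ('p' :: 'h' :: u) = 'p' :: 'ʰ' :: pvN u := by
  simp [pvN, pvSt, pvT, pvToneChar, pvRepl_fire1, pvRepl_fire2, pvRepl_fire3,
        pvRepl_skip1, pvRepl_skip2]

theorem pvN_pf (u : List Char) (h : u.head? ≠ some 'h') :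
    pvN ('p' :: 'f' :: u) = 'p' :: '͡' :: 'f' :: pvN u := by
  have hX : (List.map pvToneChar u).head? ≠ some 'h' := pvT_head 'h' u (by decide) h
  have hX1 := pvRepl_head_ne ['t','s','h'] ['ʦ','ʰ'] _ 'h' (by decide) (by decide) hX
  simp [pvN, pvSt, pvT, pvToneChar, pvRepl_fire1, pvRepl_fire2, pvRepl_fire3,
        pvRepl_skip1, pvRepl_skip2, pvRepl_skipc 'p' 'f' 'h' _ _ (by decide) hX1]

theorem pvN_dz (u : List Char) : pvN ('d' :: 'z' :: u) = 'ʣ' :: pvN u := by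
  simp [pvN, pvSt, pvT, pvToneChar, pvRepl_fire1, pvRepl_fire2, pvRepl_fire3,
        pvRepl_skip1, pvRepl_skip2]

theorem pvN_space (u : List Char) : pvN (' ' :: u) = pvN u := by
  simp [pvN, pvSt, pvT, pvToneChar, pvRepl_fire1, pvRepl_fire2, pvRepl_fire3,
        pvRepl_skip1, pvRepl_skip2]

theorem pvN_other (c : Char) (u : List Char)
    (hts : ¬ ('t' = c ∧ u.head? = some 's')) (hth : ¬ ('t' = c ∧ u.head? = some 'h'))
    (hkh : ¬ ('k' = c ∧ u.head? = some 'h')) (hph : ¬ ('p' = c ∧ u.head? = some 'h'))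
    (hpf : ¬ ('p' = c ∧ u.head? = some 'f')) (hdz : ¬ ('d' = c ∧ u.head? = some 'z'))
    (h0 : ¬ '0' = c) (h1 : ¬ '1' = c) (h2 : ¬ '2' = c) (h3 : ¬ '3' = c)
    (h4 : ¬ '4' = c) (h5 : ¬ '5' = c) (hsp : ¬ ' ' = c) :
    pvN (c :: u) = c :: pvN u := by
  have htc : pvToneChar c = c := by
    simp [pvToneChar]
    split_ifs <;> simp_all [eq_comm]
  by_cases ht : c = 't'
  · subst ht
    have m0s : (List.map pvToneChar u).head? ≠ some 's' :=
      pvT_head 's' u (by decide) (fun e => hts ⟨rfl, e⟩)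
    have m0h : (List.map pvToneChar u).head? ≠ some 'h' :=
      pvT_head 'h' u (by decide) (fun e => hth ⟨rfl, e⟩)
    have m1s := pvRepl_head_ne ['t','s','h'] ['ʦ','ʰ'] _ 's' (by decide) (by decide) m0s
    have m1h := pvRepl_head_ne ['t','s','h'] ['ʦ','ʰ'] _ 'h' (by decide) (by decide) m0h
    have m2s := pvRepl_head_ne ['p','f','h'] ['p','͡','f','ʰ'] _ 's' (by decide) (by decide) m1s
    have m2h := pvRepl_head_ne ['p','f','h'] ['p','͡','f','ʰ'] _ 'h' (by decide) (by decide) m1h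
    have m3h := pvRepl_head_ne ['t','s'] ['ʦ'] _ 'h' (by decide) (by decide) m2h
    simp [pvN, pvSt, pvT, pvToneChar, pvRepl_skip1,
          pvRepl_skipb 't' 's' ['h'] _ _ m0s,
          pvRepl_skipb 't' 's' [] _ _ m2s, pvRepl_skipb 't' 'h' [] _ _ m3h]
  by_cases hp : c = 'p'
  · subst hp
    have m0f : (List.map pvToneChar u).head? ≠ some 'f' :=
      pvT_head 'f' u (by decide) (fun e => hpf ⟨rfl, e⟩)
    have m0h : (List.map pvToneChar u).head? ≠ some 'h' :=
      pvT_head 'h' u (by decide) (fun e => hph ⟨rfl, e⟩)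
    have m1f := pvRepl_head_ne ['t','s','h'] ['ʦ','ʰ'] _ 'f' (by decide) (by decide) m0f
    have m1h := pvRepl_head_ne ['t','s','h'] ['ʦ','ʰ'] _ 'h' (by decide) (by decide) m0h
    have m2h := pvRepl_head_ne ['p','f','h'] ['p','͡','f','ʰ'] _ 'h' (by decide) (by decide) m1h
    have m3h := pvRepl_head_ne ['t','s'] ['ʦ'] _ 'h' (by decide) (by decide) m2h
    have m4h := pvRepl_head_ne ['t','h'] ['t','ʰ'] _ 'h' (by decide) (by decide) m3h
    have m5h := pvRepl_head_ne ['k','h'] ['k','ʰ'] _ 'h' (by decide) (by decide) m4h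
    have m2f := pvRepl_head_ne ['p','f','h'] ['p','͡','f','ʰ'] _ 'f' (by decide) (by decide) m1f
    have m3f := pvRepl_head_ne ['t','s'] ['ʦ'] _ 'f' (by decide) (by decide) m2f
    have m4f := pvRepl_head_ne ['t','h'] ['t','ʰ'] _ 'f' (by decide) (by decide) m3f
    have m5f := pvRepl_head_ne ['k','h'] ['k','ʰ'] _ 'f' (by decide) (by decide) m4f
    have m6f := pvRepl_head_ne ['p','h'] ['p','ʰ'] _ 'f' (by decide) (by decide) m5f
    simp [pvN, pvSt, pvT, pvToneChar, pvRepl_skip1,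
          pvRepl_skipb 'p' 'f' ['h'] _ _ m1f,
          pvRepl_skipb 'p' 'h' [] _ _ m5h, pvRepl_skipb 'p' 'f' [] _ _ m6f]
  by_cases hk : c = 'k'
  · subst hk
    have m0h : (List.map pvToneChar u).head? ≠ some 'h' :=
      pvT_head 'h' u (by decide) (fun e => hkh ⟨rfl, e⟩)
    have m1h := pvRepl_head_ne ['t','s','h'] ['ʦ','ʰ'] _ 'h' (by decide) (by decide) m0h
    have m2h := pvRepl_head_ne ['p','f','h'] ['p','͡','f','ʰ'] _ 'h' (by decide) (by decide) m1h
    have m3h := pvRepl_head_ne ['t','s'] ['ʦ'] _ 'h' (by decide) (by decide) m2h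
    have m4h := pvRepl_head_ne ['t','h'] ['t','ʰ'] _ 'h' (by decide) (by decide) m3h
    simp [pvN, pvSt, pvT, pvToneChar, pvRepl_skip1, pvRepl_skipb 'k' 'h' [] _ _ m4h]
  by_cases hd : c = 'd'
  · subst hd
    have m0z : (List.map pvToneChar u).head? ≠ some 'z' :=
      pvT_head 'z' u (by decide) (fun e => hdz ⟨rfl, e⟩)
    have m1z := pvRepl_head_ne ['t','s','h'] ['ʦ','ʰ'] _ 'z' (by decide) (by decide) m0z
    have m2z := pvRepl_head_ne ['p','f','h'] ['p','͡','f','ʰ'] _ 'z' (by decide) (by decide) m1z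
    have m3z := pvRepl_head_ne ['t','s'] ['ʦ'] _ 'z' (by decide) (by decide) m2z
    have m4z := pvRepl_head_ne ['t','h'] ['t','ʰ'] _ 'z' (by decide) (by decide) m3z
    have m5z := pvRepl_head_ne ['k','h'] ['k','ʰ'] _ 'z' (by decide) (by decide) m4z
    have m6z := pvRepl_head_ne ['p','h'] ['p','ʰ'] _ 'z' (by decide) (by decide) m5z
    have m7z := pvRepl_head_ne ['p','f'] ['p','͡','f'] _ 'z' (by decide) (by decide) m6z
    simp [pvN, pvSt, pvT, pvToneChar, pvRepl_skip1, pvRepl_skipb 'd' 'z' [] _ _ m7z]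
  · -- c matches no pattern head at all
    have st : ¬ 't' = c := fun e => ht e.symm
    have sp : ¬ 'p' = c := fun e => hp e.symm
    have sk : ¬ 'k' = c := fun e => hk e.symm
    have sd : ¬ 'd' = c := fun e => hd e.symm
    simp [pvN, pvSt, pvT, htc, pvRepl_skip1 _ _ _ _ _ st, pvRepl_skip1 _ _ _ _ _ sp,
          pvRepl_skip1 _ _ _ _ _ sk, pvRepl_skip1 _ _ _ _ _ sd,
          pvRepl_skip1 _ _ _ _ _ hsp]

-- the evaluated rule table (definitional)
theorem pvFindRule_eval (l : List Char) :
    pvFindRule pvRules l =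
      (if ['t','s','h'].isPrefixOf l then some (['t','s','h'], ['ʦ','ʰ'])
       else if ['p','f','h'].isPrefixOf l then some (['p','f','h'], ['p','͡','f','ʰ'])
       else if ['t','s'].isPrefixOf l then some (['t','s'], ['ʦ'])
       else if ['t','h'].isPrefixOf l then some (['t','h'], ['t','ʰ'])
       else if ['k','h'].isPrefixOf l then some (['k','h'], ['k','ʰ'])
       else if ['p','h'].isPrefixOf l then some (['p','h'], ['p','ʰ'])
       else if ['p','f'].isPrefixOf l then some (['p','f'], ['p','͡','f'])
       else if ['d','z'].isPrefixOf l then some (['d','z'], ['ʣ'])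
       else if [' '].isPrefixOf l then some ([' '], [])
       else if ['0'].isPrefixOf l then some (['0'], ['¹'])
       else if ['1'].isPrefixOf l then some (['1'], ['²'])
       else if ['2'].isPrefixOf l then some (['2'], ['³'])
       else if ['3'].isPrefixOf l then some (['3'], ['⁴'])
       else if ['4'].isPrefixOf l then some (['4'], ['⁵'])
       else if ['5'].isPrefixOf l then some (['5'], ['⁶'])
       else none) := rfl

theorem pvScan_some (c : Char) (t p r : List Char)
    (h : pvFindRule pvRules (c :: t) = some (p, r)) :
    pvScan (c :: t) = r ++ pvScan (t.drop (p.length - 1)) := by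
  rw [pvScan, h]

theorem pvScan_none (c : Char) (t : List Char)
    (h : pvFindRule pvRules (c :: t) = none) :
    pvScan (c :: t) = c :: pvScan t := by
  rw [pvScan, h]

-- ===== B equals the normal form =====
set_option maxHeartbeats 2000000 in
theorem pvScan_eq_pvN : ∀ (l : List Char), pvScan l = pvN l := by
  suffices H : ∀ (n : Nat) (l : List Char), l.length ≤ n → pvScan l = pvN l by
    intro l; exact H l.length l le_rfl
  intro n
  induction n with
  | zero =>
    intro l hl
    have : l = [] := by cases l <;> simp_all
    subst this
    simp [pvScan, pvN, pvSt, pvT, pvRepl_nil]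
  | succ n ih =>
    intro l hl
    rcases l with _ | ⟨c, t⟩
    · simp [pvScan, pvN, pvSt, pvT, pvRepl_nil]
    · rcases hv : pvFindRule pvRules (c :: t) with _ | ⟨p, r⟩
      · -- no rule matched: copy one character
        rw [pvScan_none _ _ hv]
        rw [pvFindRule_eval] at hv
        by_cases g1 : ['t','s','h'].isPrefixOf (c :: t) = true
        · rw [if_pos g1] at hv
          simp at hv
        · rw [if_neg (by simp [g1])] at hv
          by_cases g2 : ['p','f','h'].isPrefixOf (c :: t) = true
          · rw [if_pos g2] at hv
            simp at hv
          · rw [if_neg (by simp [g2])] at hv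
            by_cases g3 : ['t','s'].isPrefixOf (c :: t) = true
            · rw [if_pos g3] at hv
              simp at hv
            · rw [if_neg (by simp [g3])] at hv
              by_cases g4 : ['t','h'].isPrefixOf (c :: t) = true
              · rw [if_pos g4] at hv
                simp at hv
              · rw [if_neg (by simp [g4])] at hv
                by_cases g5 : ['k','h'].isPrefixOf (c :: t) = true
                · rw [if_pos g5] at hv
                  simp at hv
                · rw [if_neg (by simp [g5])] at hv
                  by_cases g6 : ['p','h'].isPrefixOf (c :: t) = true
                  · rw [if_pos g6] at hv
                    simp at hv
                  · rw [if_neg (by simp [g6])] at hv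
                    by_cases g7 : ['p','f'].isPrefixOf (c :: t) = true
                    · rw [if_pos g7] at hv
                      simp at hv
                    · rw [if_neg (by simp [g7])] at hv
                      by_cases g8 : ['d','z'].isPrefixOf (c :: t) = true
                      · rw [if_pos g8] at hv
                        simp at hv
                      · rw [if_neg (by simp [g8])] at hv
                        by_cases g9 : [' '].isPrefixOf (c :: t) = true
                        · rw [if_pos g9] at hv
                          simp at hv
                        · rw [if_neg (by simp [g9])] at hv
                          by_cases g10 : ['0'].isPrefixOf (c :: t) = true
                          · rw [if_pos g10] at hv
                            simp at hv
                          · rw [if_neg (by simp [g10])] at hv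
                            by_cases g11 : ['1'].isPrefixOf (c :: t) = true
                            · rw [if_pos g11] at hv
                              simp at hv
                            · rw [if_neg (by simp [g11])] at hv
                              by_cases g12 : ['2'].isPrefixOf (c :: t) = true
                              · rw [if_pos g12] at hv
                                simp at hv
                              · rw [if_neg (by simp [g12])] at hv
                                by_cases g13 : ['3'].isPrefixOf (c :: t) = true
                                · rw [if_pos g13] at hv
                                  simp at hv
                                · rw [if_neg (by simp [g13])] at hv
                                  by_cases g14 : ['4'].isPrefixOf (c :: t) = true
                                  · rw [if_pos g14] at hv
                                    simp at hv
                                  · rw [if_neg (by simp [g14])] at hv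
                                    by_cases g15 : ['5'].isPrefixOf (c :: t) = true
                                    · rw [if_pos g15] at hv
                                      simp at hv
                                    · rw [if_neg (by simp [g15])] at hv
                                      rw [ih t (by simp at hl; omega)]
                                      exact (pvN_other c t
                                        (fun e => g3 ((pair_isPrefixOf_iff _ _ _ _).mpr e))
                                        (fun e => g4 ((pair_isPrefixOf_iff _ _ _ _).mpr e))
                                        (fun e => g5 ((pair_isPrefixOf_iff _ _ _ _).mpr e))
                                        (fun e => g6 ((pair_isPrefixOf_iff _ _ _ _).mpr e))
                                        (fun e => g7 ((pair_isPrefixOf_iff _ _ _ _).mpr e))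
                                        (fun e => g8 ((pair_isPrefixOf_iff _ _ _ _).mpr e))
                                        (fun e => g10 ((singleton_isPrefixOf_iff _ _).mpr (by simp [← e])))
                                        (fun e => g11 ((singleton_isPrefixOf_iff _ _).mpr (by simp [← e])))
                                        (fun e => g12 ((singleton_isPrefixOf_iff _ _).mpr (by simp [← e])))
                                        (fun e => g13 ((singleton_isPrefixOf_iff _ _).mpr (by simp [← e])))
                                        (fun e => g14 ((singleton_isPrefixOf_iff _ _).mpr (by simp [← e])))
                                        (fun e => g15 ((singleton_isPrefixOf_iff _ _).mpr (by simp [← e])))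
                                        (fun e => g9 ((singleton_isPrefixOf_iff _ _).mpr (by simp [← e])))).symm
      · -- some rule fired
        rw [pvScan_some _ _ _ _ hv]
        rw [pvFindRule_eval] at hv
        by_cases g1 : ['t','s','h'].isPrefixOf (c :: t) = true
        · rw [if_pos g1] at hv
          cases hv
          obtain ⟨u, hu⟩ := List.isPrefixOf_iff_prefix.mp g1
          simp only [List.cons_append, List.nil_append] at hu
          injection hu with e1 hu; subst e1; subst hu
          simp only [List.length_cons, List.length_nil, List.drop_succ_cons,
            List.drop_zero, Nat.add_sub_cancel]
          rw [ih u (by simp at hl; omega), pvN_tsh]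
          rfl
        · rw [if_neg (by simp [g1])] at hv
          by_cases g2 : ['p','f','h'].isPrefixOf (c :: t) = true
          · rw [if_pos g2] at hv
            cases hv
            obtain ⟨u, hu⟩ := List.isPrefixOf_iff_prefix.mp g2
            simp only [List.cons_append, List.nil_append] at hu
            injection hu with e1 hu; subst e1; subst hu
            simp only [List.length_cons, List.length_nil, List.drop_succ_cons,
              List.drop_zero, Nat.add_sub_cancel]
            rw [ih u (by simp at hl; omega), pvN_pfh]
            rfl
          · rw [if_neg (by simp [g2])] at hv
            by_cases g3 : ['t','s'].isPrefixOf (c :: t) = true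
            · rw [if_pos g3] at hv
              cases hv
              obtain ⟨u, hu⟩ := List.isPrefixOf_iff_prefix.mp g3
              simp only [List.cons_append, List.nil_append] at hu
              injection hu with e1 hu; subst e1; subst hu
              have hh : u.head? ≠ some 'h' := fun e =>
                g1 (by simp [List.isPrefixOf, (singleton_isPrefixOf_iff 'h' u).mpr e])
              simp only [List.length_cons, List.length_nil, List.drop_succ_cons,
                List.drop_zero, Nat.add_sub_cancel]
              rw [ih u (by simp at hl; omega), pvN_ts u hh]
              rfl
            · rw [if_neg (by simp [g3])] at hv
              by_cases g4 : ['t','h'].isPrefixOf (c :: t) = true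
              · rw [if_pos g4] at hv
                cases hv
                obtain ⟨u, hu⟩ := List.isPrefixOf_iff_prefix.mp g4
                simp only [List.cons_append, List.nil_append] at hu
                injection hu with e1 hu; subst e1; subst hu
                simp only [List.length_cons, List.length_nil, List.drop_succ_cons,
                  List.drop_zero, Nat.add_sub_cancel]
                rw [ih u (by simp at hl; omega), pvN_th]
                rfl
              · rw [if_neg (by simp [g4])] at hv
                by_cases g5 : ['k','h'].isPrefixOf (c :: t) = true
                · rw [if_pos g5] at hv
                  cases hv
                  obtain ⟨u, hu⟩ := List.isPrefixOf_iff_prefix.mp g5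
                  simp only [List.cons_append, List.nil_append] at hu
                  injection hu with e1 hu; subst e1; subst hu
                  simp only [List.length_cons, List.length_nil, List.drop_succ_cons,
                    List.drop_zero, Nat.add_sub_cancel]
                  rw [ih u (by simp at hl; omega), pvN_kh]
                  rfl
                · rw [if_neg (by simp [g5])] at hv
                  by_cases g6 : ['p','h'].isPrefixOf (c :: t) = true
                  · rw [if_pos g6] at hv
                    cases hv
                    obtain ⟨u, hu⟩ := List.isPrefixOf_iff_prefix.mp g6
                    simp only [List.cons_append, List.nil_append] at hu
                    injection hu with e1 hu; subst e1; subst hu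
                    simp only [List.length_cons, List.length_nil, List.drop_succ_cons,
                      List.drop_zero, Nat.add_sub_cancel]
                    rw [ih u (by simp at hl; omega), pvN_ph]
                    rfl
                  · rw [if_neg (by simp [g6])] at hv
                    by_cases g7 : ['p','f'].isPrefixOf (c :: t) = true
                    · rw [if_pos g7] at hv
                      cases hv
                      obtain ⟨u, hu⟩ := List.isPrefixOf_iff_prefix.mp g7
                      simp only [List.cons_append, List.nil_append] at hu
                      injection hu with e1 hu; subst e1; subst hu
                      have hh : u.head? ≠ some 'h' := fun e =>
                        g2 (by simp [List.isPrefixOf, (singleton_isPrefixOf_iff 'h' u).mpr e])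
                      simp only [List.length_cons, List.length_nil, List.drop_succ_cons,
                        List.drop_zero, Nat.add_sub_cancel]
                      rw [ih u (by simp at hl; omega), pvN_pf u hh]
                      rfl
                    · rw [if_neg (by simp [g7])] at hv
                      by_cases g8 : ['d','z'].isPrefixOf (c :: t) = true
                      · rw [if_pos g8] at hv
                        cases hv
                        obtain ⟨u, hu⟩ := List.isPrefixOf_iff_prefix.mp g8
                        simp only [List.cons_append, List.nil_append] at hu
                        injection hu with e1 hu; subst e1; subst hu
                        simp only [List.length_cons, List.length_nil, List.drop_succ_cons,
                          List.drop_zero, Nat.add_sub_cancel]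
                        rw [ih u (by simp at hl; omega), pvN_dz]
                        rfl
                      · rw [if_neg (by simp [g8])] at hv
                        by_cases g9 : [' '].isPrefixOf (c :: t) = true
                        · rw [if_pos g9] at hv
                          cases hv
                          have e1 : ' ' = c := by
                            have := (singleton_isPrefixOf_iff ' ' (c :: t)).mp g9
                            simpa using this.symm
                          subst e1
                          simp only [List.length_cons, List.length_nil, Nat.sub_self, List.drop_zero]
                          rw [ih t (by simp at hl; omega)]
                          simp [pvN_space]
                        · rw [if_neg (by simp [g9])] at hv
                          by_cases g10 : ['0'].isPrefixOf (c :: t) = true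
                          · rw [if_pos g10] at hv
                            cases hv
                            have e1 : '0' = c := by
                              have := (singleton_isPrefixOf_iff '0' (c :: t)).mp g10
                              simpa using this.symm
                            subst e1
                            simp only [List.length_cons, List.length_nil, Nat.sub_self, List.drop_zero]
                            rw [ih t (by simp at hl; omega)]
                            simp [pvN, pvSt, pvT, pvToneChar, pvRepl_skip1]
                          · rw [if_neg (by simp [g10])] at hv
                            by_cases g11 : ['1'].isPrefixOf (c :: t) = true
                            · rw [if_pos g11] at hv
                              cases hv
                              have e1 : '1' = c := by
                                have := (singleton_isPrefixOf_iff '1' (c :: t)).mp g11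
                                simpa using this.symm
                              subst e1
                              simp only [List.length_cons, List.length_nil, Nat.sub_self, List.drop_zero]
                              rw [ih t (by simp at hl; omega)]
                              simp [pvN, pvSt, pvT, pvToneChar, pvRepl_skip1]
                            · rw [if_neg (by simp [g11])] at hv
                              by_cases g12 : ['2'].isPrefixOf (c :: t) = true
                              · rw [if_pos g12] at hv
                                cases hv
                                have e1 : '2' = c := by
                                  have := (singleton_isPrefixOf_iff '2' (c :: t)).mp g12
                                  simpa using this.symm
                                subst e1
                                simp only [List.length_cons, List.length_nil, Nat.sub_self, List.drop_zero]
                                rw [ih t (by simp at hl; omega)]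
                                simp [pvN, pvSt, pvT, pvToneChar, pvRepl_skip1]
                              · rw [if_neg (by simp [g12])] at hv
                                by_cases g13 : ['3'].isPrefixOf (c :: t) = true
                                · rw [if_pos g13] at hv
                                  cases hv
                                  have e1 : '3' = c := by
                                    have := (singleton_isPrefixOf_iff '3' (c :: t)).mp g13
                                    simpa using this.symm
                                  subst e1
                                  simp only [List.length_cons, List.length_nil, Nat.sub_self, List.drop_zero]
                                  rw [ih t (by simp at hl; omega)]
                                  simp [pvN, pvSt, pvT, pvToneChar, pvRepl_skip1]
                                · rw [if_neg (by simp [g13])] at hv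
                                  by_cases g14 : ['4'].isPrefixOf (c :: t) = true
                                  · rw [if_pos g14] at hv
                                    cases hv
                                    have e1 : '4' = c := by
                                      have := (singleton_isPrefixOf_iff '4' (c :: t)).mp g14
                                      simpa using this.symm
                                    subst e1
                                    simp only [List.length_cons, List.length_nil, Nat.sub_self, List.drop_zero]
                                    rw [ih t (by simp at hl; omega)]
                                    simp [pvN, pvSt, pvT, pvToneChar, pvRepl_skip1]
                                  · rw [if_neg (by simp [g14])] at hv
                                    by_cases g15 : ['5'].isPrefixOf (c :: t) = true
                                    · rw [if_pos g15] at hv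
                                      cases hv
                                      have e1 : '5' = c := by
                                        have := (singleton_isPrefixOf_iff '5' (c :: t)).mp g15
                                        simpa using this.symm
                                      subst e1
                                      simp only [List.length_cons, List.length_nil, Nat.sub_self, List.drop_zero]
                                      rw [ih t (by simp at hl; omega)]
                                      simp [pvN, pvSt, pvT, pvToneChar, pvRepl_skip1]
                                    · rw [if_neg (by simp [g15])] at hv
                                      simp at hv

-- ===== A equals the normal form =====
theorem pvRepl_single (d u : Char) (l : List Char) :
    pvRepl [d] [u] l = l.map (fun c => if d = c then u else c) := by
  induction l with
  | nil => simp [pvRepl_nil]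
  | cons c t ih =>
    by_cases h : d = c
    · subst h; rw [pvRepl_fire1]; simp [ih]
    · rw [pvRepl_skip1 _ _ _ _ _ h]; simp [ih, h]

theorem pvTone_chain (l : List Char) :
    pvRepl ['5'] ['⁶'] (pvRepl ['4'] ['⁵'] (pvRepl ['3'] ['⁴'] (pvRepl ['2'] ['³']
      (pvRepl ['1'] ['²'] (pvRepl ['0'] ['¹'] l))))) = List.map pvToneChar l := by
  simp only [pvRepl_single, List.map_map]
  refine List.map_congr_left (fun a _ => ?_)
  simp only [Function.comp_apply]
  by_cases h0 : a = '0'; · subst h0; decide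
  by_cases h1 : a = '1'; · subst h1; decide
  by_cases h2 : a = '2'; · subst h2; decide
  by_cases h3 : a = '3'; · subst h3; decide
  by_cases h4 : a = '4'; · subst h4; decide
  by_cases h5 : a = '5'; · subst h5; decide
  rw [if_neg (show ¬ ('0' = a) from fun e => h0 e.symm),
      if_neg (show ¬ ('1' = a) from fun e => h1 e.symm),
      if_neg (show ¬ ('2' = a) from fun e => h2 e.symm),
      if_neg (show ¬ ('3' = a) from fun e => h3 e.symm),
      if_neg (show ¬ ('4' = a) from fun e => h4 e.symm),
      if_neg (show ¬ ('5' = a) from fun e => h5 e.symm)]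
  simp [pvToneChar, h0, h1, h2, h3, h4, h5]

theorem pvRepl_space_id (x : List Char) (h : ' ' ∉ x) : pvRepl [' '] [] x = x := by
  induction x with
  | nil => simp [pvRepl_nil]
  | cons c t ih =>
    simp only [List.mem_cons, not_or] at h
    rw [pvRepl_skip1 ' ' [] [] c t h.1, ih h.2]

-- the 14 replace passes of A, before its final space test (proof-side name)
def pvChainA (seq : String) : String :=
  let s1 := PySem.Str.replace seq "0" "¹"
  let s2 := PySem.Str.replace s1 "1" "²"
  let s3 := PySem.Str.replace s2 "2" "³"
  let s4 := PySem.Str.replace s3 "3" "⁴"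
  let s5 := PySem.Str.replace s4 "4" "⁵"
  let s6 := PySem.Str.replace s5 "5" "⁶"
  let u1 := PySem.Str.replace s6 "tsh" "ʦʰ"
  let u2 := PySem.Str.replace u1 "pfh" "p͡fʰ"
  let u3 := PySem.Str.replace u2 "ts" "ʦ"
  let u4 := PySem.Str.replace u3 "th" "tʰ"
  let u5 := PySem.Str.replace u4 "kh" "kʰ"
  let u6 := PySem.Str.replace u5 "ph" "pʰ"
  let u7 := PySem.Str.replace u6 "pf" "p͡f"
  PySem.Str.replace u7 "dz" "ʣ"

theorem pvChainA_toList (seq : String) :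
    (pvChainA seq).toList = pvSt (pvT seq.toList) := by
  simp only [pvChainA, PySem.Str.toList_replace]
  simp only [pvReplace_eq _ _ _ (by simp : ¬ ("0" : String).toList = []),
             pvReplace_eq _ _ _ (by simp : ¬ ("1" : String).toList = []),
             pvReplace_eq _ _ _ (by simp : ¬ ("2" : String).toList = []),
             pvReplace_eq _ _ _ (by simp : ¬ ("3" : String).toList = []),
             pvReplace_eq _ _ _ (by simp : ¬ ("4" : String).toList = []),
             pvReplace_eq _ _ _ (by simp : ¬ ("5" : String).toList = []),
             pvReplace_eq _ _ _ (by simp : ¬ ("tsh" : String).toList = []),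
             pvReplace_eq _ _ _ (by simp : ¬ ("pfh" : String).toList = []),
             pvReplace_eq _ _ _ (by simp : ¬ ("ts" : String).toList = []),
             pvReplace_eq _ _ _ (by simp : ¬ ("th" : String).toList = []),
             pvReplace_eq _ _ _ (by simp : ¬ ("kh" : String).toList = []),
             pvReplace_eq _ _ _ (by simp : ¬ ("ph" : String).toList = []),
             pvReplace_eq _ _ _ (by simp : ¬ ("pf" : String).toList = []),
             pvReplace_eq _ _ _ (by simp : ¬ ("dz" : String).toList = [])]
  rw [show (("0" : String).toList) = ['0'] from rfl, show (("¹" : String).toList) = ['¹'] from rfl,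
      show (("1" : String).toList) = ['1'] from rfl, show (("²" : String).toList) = ['²'] from rfl,
      show (("2" : String).toList) = ['2'] from rfl, show (("³" : String).toList) = ['³'] from rfl,
      show (("3" : String).toList) = ['3'] from rfl, show (("⁴" : String).toList) = ['⁴'] from rfl,
      show (("4" : String).toList) = ['4'] from rfl, show (("⁵" : String).toList) = ['⁵'] from rfl,
      show (("5" : String).toList) = ['5'] from rfl, show (("⁶" : String).toList) = ['⁶'] from rfl]
  rw [pvTone_chain]
  rfl

theorem clean_chinese_ipa_eq_if (seq : String) :
    clean_chinese_ipa seq =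
      (if PySem.Str.isIn " " (pvChainA seq) then PySem.Str.replace (pvChainA seq) " " ""
       else pvChainA seq) := rfl

theorem clean_chinese_ipa_toList (seq : String) :
    (clean_chinese_ipa seq).toList = pvN seq.toList := by
  rw [clean_chinese_ipa_eq_if]
  by_cases hin : PySem.Str.isIn " " (pvChainA seq) = true
  · rw [if_pos hin]
    rw [show (PySem.Str.replace (pvChainA seq) " " "").toList
          = PySem.Chars.replace (pvChainA seq).toList [' '] [] from
        by simp [PySem.Str.toList_replace]]
    rw [pvReplace_eq _ _ _ (by simp), pvChainA_toList]
    rfl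
  · rw [if_neg hin]
    have hmem : ' ' ∉ (pvChainA seq).toList := by
      intro hm
      exact hin ((PySem.Str.isIn_iff_infix _ _).mpr
        (by simpa using (List.singleton_infix_iff ' ' (pvChainA seq).toList).mpr hm))
    rw [pvN, ← pvChainA_toList, pvRepl_space_id _ hmem]

-- ===== VERDICT (by name: the statement is the Claim_ definition above) =====
theorem clean_chinese_ipa_spec : Claim_equal_clean_chinese_ipa := by
  intro seq _
  unfold Spec_clean_chinese_ipa clean_chinese_ipa_alt
  rw [pvScan_eq_pvN, ← clean_chinese_ipa_toList, String.ofList_toList]
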